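-- pv_equiv track=rewrite | github.com/madebymlai/spec-context-mcp | chunkhound/autodoc/markdown_utils.py | _remove_duplicate_title_line
-- ===== SOURCE A (Python) =====
-- def _remove_duplicate_title_line(text: str, title: str) -> str:
--     lines = text.splitlines()
--     cleaned: list[str] = []
--     removed = False
--     for line in lines:
--         stripped = line.strip()
--         if not stripped and not cleaned:
--             continue
--         if not removed and stripped in {
--             f"**{title}**",
--             f"**{title.rstrip()}**",
--         }:
--             removed = True
--             continue
--         cleaned.append(line)
--     return "\n".join(cleaned).lstrip()
-- ===== SOURCE B (Python) =====
-- def _remove_duplicate_title_line(text: str, title: str) -> str: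
--     candidates = {f"**{title}**", f"**{title.rstrip()}**"}
--     lines = text.splitlines()
--     for i, line in enumerate(lines):
--         if line.strip() in candidates:
--             del lines[i]
--             break
--     return "\n".join(lines).lstrip()
-- ===== Notes on version B (the rewrite author's own statement) =====
-- stated objective: simpler
-- what changed: Replaces the flag-and-accumulator filter loop (with its explicit leading-blank-skip branch) by a single find-first-matching-line-and-delete pass; the final lstrip alone removes leading blanks.
import Mathlib
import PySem

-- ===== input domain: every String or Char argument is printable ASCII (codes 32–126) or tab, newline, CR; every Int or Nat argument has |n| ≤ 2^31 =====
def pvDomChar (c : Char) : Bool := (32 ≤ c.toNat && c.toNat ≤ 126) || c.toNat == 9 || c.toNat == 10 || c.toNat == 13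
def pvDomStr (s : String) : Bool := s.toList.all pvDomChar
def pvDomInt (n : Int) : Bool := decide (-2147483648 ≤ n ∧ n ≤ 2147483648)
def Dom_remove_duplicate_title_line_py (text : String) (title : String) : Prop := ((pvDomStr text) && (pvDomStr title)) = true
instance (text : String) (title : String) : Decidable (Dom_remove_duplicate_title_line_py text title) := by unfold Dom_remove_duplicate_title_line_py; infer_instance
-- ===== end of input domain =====

-- B replaces A's flag-and-accumulator filter loop (with its leading-blank-skip branch) by a
-- single find-first-matching-line-and-delete pass; objective: simpler (the final lstrip alone
-- removes leading blanks).

-- ===== PORT A =====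
-- A's for-loop with state (cleaned, removed); branches in A's order.
def pvALoop (c1 c2 : List Char) : List (List Char) → Bool → List (List Char) → List (List Char)
  | [], _, cleaned => cleaned
  | l :: ls, removed, cleaned =>
    let stripped := PySem.Chars.strip l
    if stripped = [] ∧ cleaned = [] then
      pvALoop c1 c2 ls removed cleaned
    else if removed = false ∧ (stripped = c1 ∨ stripped = c2) then
      pvALoop c1 c2 ls true cleaned
    else
      pvALoop c1 c2 ls removed (cleaned ++ [l])

def remove_duplicate_title_line_py (text : String) (title : String) : String :=
  let lines := PySem.Chars.splitlines text.toList
  let c1 := ['*', '*'] ++ title.toList ++ ['*', '*']                      -- f"**{title}**"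
  let c2 := ['*', '*'] ++ PySem.Chars.rstrip title.toList ++ ['*', '*']   -- f"**{title.rstrip()}**"
  String.ofList (PySem.Chars.lstrip (PySem.Chars.join ['\n'] (pvALoop c1 c2 lines false [])))

-- ===== PORT B =====
-- B's scan: delete the first line whose strip is a candidate, then stop (the for/del/break loop).
def pvBDelFirst (c1 c2 : List Char) : List (List Char) → List (List Char)
  | [] => []
  | l :: ls =>
    if PySem.Chars.strip l = c1 ∨ PySem.Chars.strip l = c2 then ls
    else l :: pvBDelFirst c1 c2 ls

def remove_duplicate_title_line_py_alt (text : String) (title : String) : String :=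
  let c1 := ['*', '*'] ++ title.toList ++ ['*', '*']
  let c2 := ['*', '*'] ++ PySem.Chars.rstrip title.toList ++ ['*', '*']
  let lines := pvBDelFirst c1 c2 (PySem.Chars.splitlines text.toList)
  String.ofList (PySem.Chars.lstrip (PySem.Chars.join ['\n'] lines))

-- ===== PRECONDITION & SPEC =====
def Spec_remove_duplicate_title_line_py (text : String) (title : String) (out : String) : Prop := out = remove_duplicate_title_line_py_alt text title
instance (text : String) (title : String) (out : String) : Decidable (Spec_remove_duplicate_title_line_py text title out) := by unfold Spec_remove_duplicate_title_line_py; infer_instance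

-- ===== CLAIM (what is proved, stated in full; the proofs are below) =====
def Claim_equal_remove_duplicate_title_line_py : Prop := ∀ (text : String) (title : String), Dom_remove_duplicate_title_line_py text title → Spec_remove_duplicate_title_line_py text title (remove_duplicate_title_line_py text title)

-- ===== LEMMAS AND PROOFS =====

-- strip l = [] means every character of l is whitespace
lemma strip_eq_nil_all_isspace (l : List Char) (h : PySem.Chars.strip l = []) :
    ∀ c ∈ l, PySem.Chars.isspace c = true := by
  intro c hc
  unfold PySem.Chars.strip PySem.Chars.rstrip PySem.Chars.lstrip at h
  have h' : List.dropWhile PySem.Chars.isspace (List.dropWhile PySem.Chars.isspace l).reverse = [] := by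
    have := congrArg List.reverse h
    simpa using this
  have hall : ∀ c ∈ (List.dropWhile PySem.Chars.isspace l), PySem.Chars.isspace c = true := by
    intro c hc
    have := (List.dropWhile_eq_nil_iff).mp h' c (by simpa using hc)
    exact this
  rcases List.mem_append.mp (by
      rw [List.takeWhile_append_dropWhile] ; exact hc :
      c ∈ List.takeWhile PySem.Chars.isspace l ++ List.dropWhile PySem.Chars.isspace l) with h1 | h2
  · exact List.mem_takeWhile_imp h1
  · exact hall c h2

-- lstrip eats an all-whitespace prefix
lemma lstrip_append_of_all_space (l t : List Char) (h : ∀ c ∈ l, PySem.Chars.isspace c = true) :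
    PySem.Chars.lstrip (l ++ t) = PySem.Chars.lstrip t := by
  unfold PySem.Chars.lstrip
  induction l with
  | nil => rfl
  | cons a l ih =>
    simp only [List.cons_append, List.dropWhile_cons]
    rw [h a (by simp)]
    simp only [if_true]
    exact ih (fun c hc => h c (by simp [hc]))

-- a blank line at the front disappears under join-then-lstrip
lemma lstrip_join_blank_cons (l : List Char) (xs : List (List Char))
    (h : PySem.Chars.strip l = []) :
    PySem.Chars.lstrip (PySem.Chars.join ['\n'] (l :: xs)) =
    PySem.Chars.lstrip (PySem.Chars.join ['\n'] xs) := by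
  have hall := strip_eq_nil_all_isspace l h
  cases xs with
  | nil =>
    have h1 : PySem.Chars.join ['\n'] [l] = l := by
      simp [PySem.Chars.join, List.intercalate]
    have h2 : PySem.Chars.lstrip l = [] := by
      have := lstrip_append_of_all_space l [] hall
      simpa using this
    rw [h1, h2]; rfl
  | cons y ys =>
    have hj : PySem.Chars.join ['\n'] (l :: y :: ys) =
        l ++ ['\n'] ++ PySem.Chars.join ['\n'] (y :: ys) := by
      simp [PySem.Chars.join, List.intercalate, List.intersperse]
    rw [hj, List.append_assoc, lstrip_append_of_all_space l _ hall]
    have : PySem.Chars.lstrip (['\n'] ++ PySem.Chars.join ['\n'] (y :: ys)) =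
        PySem.Chars.lstrip (PySem.Chars.join ['\n'] (y :: ys)) :=
      lstrip_append_of_all_space ['\n'] _ (by intro c hc; simp at hc; subst hc; decide)
    exact this

-- A with removed=true and nonempty cleaned just appends the rest
lemma pvALoop_true_ne_nil (c1 c2 : List Char) (ls : List (List Char)) :
    ∀ c : List (List Char), c ≠ [] → pvALoop c1 c2 ls true c = c ++ ls := by
  induction ls with
  | nil => intro c _; simp [pvALoop]
  | cons l ls ih =>
    intro c hc
    simp only [pvALoop]
    rw [if_neg (by simp [hc]), if_neg (by simp)]
    rw [ih (c ++ [l]) (by simp)]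
    simp

-- A with removed=true and empty cleaned drops leading blanks then appends
lemma pvALoop_true_nil (c1 c2 : List Char) (ls : List (List Char)) :
    pvALoop c1 c2 ls true [] = List.dropWhile (fun l => decide (PySem.Chars.strip l = [])) ls := by
  induction ls with
  | nil => simp [pvALoop]
  | cons l ls ih =>
    simp only [pvALoop, List.dropWhile_cons]
    by_cases hb : PySem.Chars.strip l = []
    · rw [if_pos (by simp [hb]), ih]; simp [hb]
    · rw [if_neg (by simp [hb]), if_neg (by simp)]
      rw [List.nil_append, pvALoop_true_ne_nil c1 c2 ls [l] (by simp)]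
      simp [hb]

-- A with removed=false and nonempty cleaned is cleaned ++ delete-first-match
lemma pvALoop_false_ne_nil (c1 c2 : List Char) (ls : List (List Char)) :
    ∀ c : List (List Char), c ≠ [] → pvALoop c1 c2 ls false c = c ++ pvBDelFirst c1 c2 ls := by
  induction ls with
  | nil => intro c _; simp [pvALoop, pvBDelFirst]
  | cons l ls ih =>
    intro c hc
    simp only [pvALoop, pvBDelFirst]
    rw [if_neg (by simp [hc])]
    by_cases hm : PySem.Chars.strip l = c1 ∨ PySem.Chars.strip l = c2
    · rw [if_pos (by simpa using hm), if_pos hm]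
      exact pvALoop_true_ne_nil c1 c2 ls c hc
    · rw [if_neg (by simpa using hm), if_neg hm]
      rw [ih (c ++ [l]) (by simp)]
      simp

-- dropping leading blank lines does not change join-then-lstrip
lemma lstrip_join_dropWhile (ls : List (List Char)) :
    PySem.Chars.lstrip (PySem.Chars.join ['\n']
      (List.dropWhile (fun l => decide (PySem.Chars.strip l = [])) ls)) =
    PySem.Chars.lstrip (PySem.Chars.join ['\n'] ls) := by
  induction ls with
  | nil => rfl
  | cons l ls ih =>
    by_cases hb : PySem.Chars.strip l = []
    · rw [List.dropWhile_cons, if_pos (by simp [hb]), ih, lstrip_join_blank_cons l ls hb]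
    · rw [List.dropWhile_cons, if_neg (by simp [hb])]

-- main list-level equivalence
lemma pvMain (c1 c2 : List Char) (h1 : c1 ≠ []) (h2 : c2 ≠ []) (ls : List (List Char)) :
    PySem.Chars.lstrip (PySem.Chars.join ['\n'] (pvALoop c1 c2 ls false [])) =
    PySem.Chars.lstrip (PySem.Chars.join ['\n'] (pvBDelFirst c1 c2 ls)) := by
  induction ls with
  | nil => rfl
  | cons l ls ih =>
    simp only [pvALoop, pvBDelFirst]
    by_cases hb : PySem.Chars.strip l = []
    · have hm : ¬ (PySem.Chars.strip l = c1 ∨ PySem.Chars.strip l = c2) := by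
        rw [hb]; rintro (h | h) <;> [exact h1 h.symm; exact h2 h.symm]
      rw [if_pos (by simp [hb]), if_neg hm, ih, lstrip_join_blank_cons _ _ hb]
    · rw [if_neg (by simp [hb])]
      by_cases hm : PySem.Chars.strip l = c1 ∨ PySem.Chars.strip l = c2
      · rw [if_pos (by simpa using hm), if_pos hm]
        rw [pvALoop_true_nil, lstrip_join_dropWhile]
      · rw [if_neg (by simpa using hm), if_neg hm]
        rw [List.nil_append, pvALoop_false_ne_nil c1 c2 ls [l] (by simp)]
        simp

-- ===== VERDICT (by name: the statement is the Claim_ definition above) =====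
theorem remove_duplicate_title_line_py_spec : Claim_equal_remove_duplicate_title_line_py := by
  intro text title _
  unfold Spec_remove_duplicate_title_line_py remove_duplicate_title_line_py remove_duplicate_title_line_py_alt
  simp only []
  rw [pvMain _ _ (by simp) (by simp)]
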